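-- pv_equiv track=rewrite | github.com/jadeadedokun/cs2006-python-1 | Code/algebraic_calculations.py | inverted_roots_of_unity
-- ===== SOURCE A (Python) =====
-- def inverted_roots_of_unity(n, alpha):
--     """
--     Find all x ∈ Zn such that x⊗x = 1.
--
--     Args:
--         n (int): The modulus
--         alpha (int): The multiplier
--
--     Returns:
--         list: List of values x where x⊗x = 1
--
--     Examples:
--         >>> inverted_roots_of_unity(1, 0)
--         [0]
--         >>> inverted_roots_of_unity(2, 1)
--         [1]
--         >>> inverted_roots_of_unity(5, 2)
--         [2, 4]
--     """
--     roots = []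
--     target = 1 % n
--     for x in range(n):
--         result = (2 * x - alpha * x * x) % n
--         if result == target:
--             roots.append(x)
--     return roots
-- ===== SOURCE B (Python) =====
-- def inverted_roots_of_unity(n, alpha):
--     # Finite-difference scan: the quadratic f(x) = 2x - alpha*x^2 is updated
--     # incrementally (first/second differences mod n), so the loop body has no
--     # multiplications and never recomputes the polynomial.
--     target = 1 % n
--     roots = []
--     val = 0 % n
--     diff = (2 - alpha) % n
--     step = (-2 * alpha) % n
--     for x in range(n):
--         if val == target:
--             roots.append(x)
--         val = (val + diff) % n
--         diff = (diff + step) % n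
--     return roots
-- ===== Notes on version B (the rewrite author's own statement) =====
-- stated objective: faster
-- what changed: B replaces A's per-iteration polynomial evaluation (2*x - alpha*x*x) % n by a finite-difference scan that maintains the polynomial's value and its first difference modulo n, so the loop body does only additions and mods on small residues, no multiplications on growing x.
import Mathlib
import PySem

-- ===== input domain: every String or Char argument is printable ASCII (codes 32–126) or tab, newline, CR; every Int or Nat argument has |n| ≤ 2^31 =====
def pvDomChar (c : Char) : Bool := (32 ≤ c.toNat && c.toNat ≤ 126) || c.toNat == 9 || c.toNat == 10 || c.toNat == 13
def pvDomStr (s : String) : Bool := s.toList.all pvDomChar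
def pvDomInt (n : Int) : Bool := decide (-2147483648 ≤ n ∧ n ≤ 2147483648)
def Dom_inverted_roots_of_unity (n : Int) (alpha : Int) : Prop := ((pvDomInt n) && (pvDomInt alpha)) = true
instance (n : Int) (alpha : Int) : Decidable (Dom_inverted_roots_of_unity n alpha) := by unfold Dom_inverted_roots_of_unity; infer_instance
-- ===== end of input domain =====

-- B replaces A's per-iteration polynomial evaluation by a finite-difference scan
-- (value and first difference of 2x - alpha*x^2 maintained mod n); same O(n) cost,
-- but the loop body needs no multiplications.

-- ===== PORT A =====
def inverted_roots_of_unity (n : Int) (alpha : Int) : List Int :=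
  let target := PySem.Int.mod 1 n
  (PySem.List.pyRange 0 n 1).foldl
    (fun roots x =>
      if PySem.Int.mod (2 * x - alpha * x * x) n = target then roots ++ [x] else roots)
    []

-- ===== PORT B =====
def inverted_roots_of_unity_alt (n : Int) (alpha : Int) : List Int :=
  let target := PySem.Int.mod 1 n
  let step := PySem.Int.mod (-2 * alpha) n
  let st := (PySem.List.pyRange 0 n 1).foldl
    (fun (s : List Int × Int × Int) x =>
      (if s.2.1 = target then s.1 ++ [x] else s.1,
       PySem.Int.mod (s.2.1 + s.2.2) n,
       PySem.Int.mod (s.2.2 + step) n))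
    ([], PySem.Int.mod 0 n, PySem.Int.mod (2 - alpha) n)
  st.1

-- ===== PRECONDITION & SPEC =====
-- Pre_ excludes only n = 0, where the Python A raises ZeroDivisionError on '1 % n'.
def Pre_inverted_roots_of_unity (n : Int) (alpha : Int) : Prop := n ≠ 0
instance (n : Int) (alpha : Int) : Decidable (Pre_inverted_roots_of_unity n alpha) := by unfold Pre_inverted_roots_of_unity; infer_instance
def pvWitness_inverted_roots_of_unity : Int × Int := (5, 2)

def Spec_inverted_roots_of_unity (n : Int) (alpha : Int) (out : List Int) : Prop := out = inverted_roots_of_unity_alt n alpha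
instance (n : Int) (alpha : Int) (out : List Int) : Decidable (Spec_inverted_roots_of_unity n alpha out) := by unfold Spec_inverted_roots_of_unity; infer_instance

-- ===== CLAIM (what is proved, stated in full; the proofs are below) =====
def Claim_equal_inverted_roots_of_unity : Prop := ∀ (n : Int) (alpha : Int), Dom_inverted_roots_of_unity n alpha → Pre_inverted_roots_of_unity n alpha → Spec_inverted_roots_of_unity n alpha (inverted_roots_of_unity n alpha)

-- ===== LEMMAS AND PROOFS =====

lemma fmod_add_fmod (x y n : Int) :
    PySem.Int.mod (PySem.Int.mod x n + PySem.Int.mod y n) n = PySem.Int.mod (x + y) n := by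
  simp [PySem.Int.mod]

-- Loop invariant: starting B's fold at x = a with val = f(a) % n and diff = g(a) % n
-- (f x = 2x - alpha*x^2, g x = f (x+1) - f x) produces exactly A's fold result.
lemma loop_eq (n alpha target : Int) :
    ∀ (k : Nat) (a : Int) (r : List Int), a + k = n →
    ((PySem.List.pyRange a n 1).foldl
      (fun (s : List Int × Int × Int) x =>
        (if s.2.1 = target then s.1 ++ [x] else s.1,
         PySem.Int.mod (s.2.1 + s.2.2) n,
         PySem.Int.mod (s.2.2 + PySem.Int.mod (-2 * alpha) n) n))
      (r, PySem.Int.mod (2 * a - alpha * a * a) n,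
          PySem.Int.mod (2 - alpha * (2 * a + 1)) n)).1
    = (PySem.List.pyRange a n 1).foldl
      (fun roots x =>
        if PySem.Int.mod (2 * x - alpha * x * x) n = target then roots ++ [x] else roots) r := by
  intro k
  induction k with
  | zero =>
    intro a r h
    rw [PySem.List.pyRange_one_eq_nil (by omega)]
    rfl
  | succ k ih =>
    intro a r h
    rw [PySem.List.pyRange_one_cons (by omega)]
    simp only [List.foldl_cons, fmod_add_fmod]
    have h1 : 2 * a - alpha * a * a + (2 - alpha * (2 * a + 1))
        = 2 * (a + 1) - alpha * (a + 1) * (a + 1) := by ring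
    have h2 : 2 - alpha * (2 * a + 1) + -2 * alpha
        = 2 - alpha * (2 * (a + 1) + 1) := by ring
    rw [h1, h2]
    exact ih (a + 1) _ (by omega)

-- ===== VERDICT (by name: the statement is the Claim_ definition above) =====
theorem inverted_roots_of_unity_spec : Claim_equal_inverted_roots_of_unity := by
  intro n alpha _ _
  unfold Spec_inverted_roots_of_unity inverted_roots_of_unity inverted_roots_of_unity_alt
  by_cases hn : n ≤ 0
  · rw [PySem.List.pyRange_one_eq_nil hn]
    rfl
  · have := loop_eq n alpha (PySem.Int.mod 1 n) n.toNat 0 [] (by omega)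
    norm_num at this
    rw [show -(2*alpha) = (-2)*alpha by ring] at this
    exact this.symm
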